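-- pv_equiv track=rewrite | github.com/xNitix/ASD_AGH_2023 | Dynamic Programming/dynamiki/12szymusia/k-ladna_suma.py | ksuma
-- ===== SOURCE A (Python) =====
-- def ksuma( T, k):
--     n = len(T)
--     inf = float("inf")
--     ile = [inf for _ in range(n)]
--
--     for i in range(k):
--         ile[i] = T[i]
--
--     for i in range(k,n):
--         ile[i] = min(ile[i-k:i])+ T[i]
--
--     mini = inf
--
--     for j in range(n-k,n):
--         mini = min(mini,ile[j])
--
--     return mini
-- ===== SOURCE B (Python) =====
-- def ksuma(T, k):
--     n = len(T)
--     ile = []          # ile[i] = same DP value as A's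
--     dq = []           # indices with strictly increasing ile values (monotonic deque)
--     head = 0          # front pointer of the deque
--     for i in range(n):
--         if i < k:
--             val = T[i]
--         else:
--             while dq[head] < i - k:
--                 head += 1
--             val = ile[dq[head]] + T[i]
--         while len(dq) > head and ile[dq[-1]] >= val:
--             dq.pop()
--         dq.append(i)
--         ile.append(val)
--     while dq[head] < n - k:
--         head += 1
--     return ile[dq[head]]
-- ===== Notes on version B (the rewrite author's own statement) =====
-- stated objective: faster
-- what changed: Replaces the O(k) slice minimum recomputed at every DP step (and the final O(k) scan) with a monotonic deque (index list plus head pointer) that delivers each sliding-window minimum in amortized O(1).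
-- outside the precondition, e.g. on ksuma([], 0): A returns inf, B raises IndexError
import Mathlib
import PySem

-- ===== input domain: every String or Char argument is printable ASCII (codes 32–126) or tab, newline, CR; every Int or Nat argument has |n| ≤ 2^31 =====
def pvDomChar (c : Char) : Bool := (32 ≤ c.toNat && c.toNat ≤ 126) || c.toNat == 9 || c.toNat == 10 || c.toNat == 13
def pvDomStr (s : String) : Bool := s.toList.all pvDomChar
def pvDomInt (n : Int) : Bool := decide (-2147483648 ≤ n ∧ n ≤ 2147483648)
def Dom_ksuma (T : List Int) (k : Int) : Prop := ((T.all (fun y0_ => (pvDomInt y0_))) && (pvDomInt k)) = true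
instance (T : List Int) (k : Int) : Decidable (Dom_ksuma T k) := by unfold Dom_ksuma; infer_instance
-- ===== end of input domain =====

-- B replaces A's per-step O(k) slice minimum by a monotonic deque, making the DP O(n); return-value equivalence is proved on 1 ≤ k ≤ len(T).

-- ===== PORT A =====
-- float('inf') is modelled as `none`; `minOptA` is Python's two-argument `min` on {ints, inf}.
def minOptA (a b : Option Int) : Option Int :=
  match a, b with
  | none, b => b
  | some x, none => some x
  | some x, some y => some (min x y)

-- Python's min(list) over {ints, inf}; `none` result on [] marks the ValueError (excluded by Pre_).
def pyminL (l : List (Option Int)) : Option Int :=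
  match l with
  | [] => none
  | x :: xs => xs.foldl minOptA x

def ksuma (T : List Int) (k : Int) : Int :=
  let n : Int := (T.length : Int)
  let ile : List (Option Int) := (List.range T.length).map (fun _ => none)
  let ile := (PySem.List.pyRange 0 k 1).foldl
      (fun ile i => ile.set i.toNat (PySem.List.pyGet? T i)) ile
  let ile := (PySem.List.pyRange k n 1).foldl
      (fun ile i => ile.set i.toNat
        (match pyminL (PySem.List.slice ile (some (i - k)) (some i)), PySem.List.pyGet? T i with
         | some m, some t => some (m + t)
         | _, _ => none)) ile
  let mini := (PySem.List.pyRange (n - k) n 1).foldl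
      (fun mini j => minOptA mini (ile.getD j.toNat none)) none
  mini.getD 0

-- ===== PORT B =====
-- `while dq[head] < lo: head += 1` (inside Pre_ the pointer never runs off the deque).
def advB (dq : List Nat) (lo : Int) (head : Nat) : Nat :=
  if h : head < dq.length then
    if (dq[head] : Int) < lo then advB dq lo (head + 1) else head
  else head
termination_by dq.length - head
decreasing_by omega

-- `while len(dq) > head and ile[dq[-1]] >= val: dq.pop()`
def popB (ile : List Int) (val : Int) (head : Nat) (dq : List Nat) : List Nat :=
  if head < dq.length ∧ val ≤ ile.getD (dq.getLastD 0) 0 then popB ile val head dq.dropLast else dq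
termination_by dq.length
decreasing_by simp [List.length_dropLast]; omega

def ksuma_alt (T : List Int) (k : Int) : Int :=
  let n := T.length
  let st := (List.range n).foldl
    (fun (st : List Int × List Nat × Nat) (i : Nat) =>
      let ile := st.1
      let dq := st.2.1
      let head := st.2.2
      if (i : Int) < k then
        let val := T.getD i 0
        (ile ++ [val], popB ile val head dq ++ [i], head)
      else
        let head := advB dq ((i : Int) - k) head
        let val := ile.getD (dq.getD head 0) 0 + T.getD i 0
        (ile ++ [val], popB ile val head dq ++ [i], head))
    ([], [], 0)
  let head := advB st.2.1 ((n : Int) - k) st.2.2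
  st.1.getD (st.2.1.getD head 0) 0

-- ===== PRECONDITION & SPEC =====
-- Pre_ excludes exactly the inputs on which A does not return an int: for k > len(T) the first loop
-- raises IndexError, for k ≤ 0 with T ≠ [] the empty-slice min raises ValueError, and for k ≤ 0
-- with T = [] A returns float('inf'), which is not a value of the declared int type.
def Pre_ksuma (T : List Int) (k : Int) : Prop := 1 ≤ k ∧ k ≤ (T.length : Int)
instance (T : List Int) (k : Int) : Decidable (Pre_ksuma T k) := by unfold Pre_ksuma; infer_instance

def pvWitness_ksuma : List Int × Int := ([3, -1, 4, 1, -5, 9], 2)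

def Spec_ksuma (T : List Int) (k : Int) (out : Int) : Prop := out = ksuma_alt T k
instance (T : List Int) (k : Int) (out : Int) : Decidable (Spec_ksuma T k out) := by unfold Spec_ksuma; infer_instance

-- ===== CLAIM (what is proved, stated in full; the proofs are below) =====
def Claim_equal_ksuma : Prop := ∀ (T : List Int) (k : Int), Dom_ksuma T k → Pre_ksuma T k → Spec_ksuma T k (ksuma T k)

-- ===== LEMMAS AND PROOFS =====

-- Python's min of a nonempty list of ints.
def pymin (l : List Int) : Int :=
  match l with
  | [] => 0
  | x :: xs => xs.foldl min x

-- the DP prefix: specIle T K m = [v 0, …, v (m-1)] where v is the shared DP value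
def specIle (T : List Int) (K : Nat) : Nat → List Int
  | 0 => []
  | m + 1 =>
      let p := specIle T K m
      p ++ [if m < K then T.getD m 0 else pymin ((p.drop (m - K)).take K) + T.getD m 0]

def vv (T : List Int) (K : Nat) (i : Nat) : Int := (specIle T K (i + 1)).getD i 0

-- the window [lo, lo+len) of DP values
def win (T : List Int) (K : Nat) (lo len : Nat) : List Int :=
  (List.range len).map (fun t => vv T K (lo + t))

-- ---- basic lemmas ----

theorem getD_map_range_lt {α : Type} (f : Nat → α) (n j : Nat) (d : α) (h : j < n) :
    ((List.range n).map f).getD j d = f j := by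
  simp [List.getD_eq_getElem?_getD, h]

theorem pymin_le (l : List Int) : ∀ x ∈ l, pymin l ≤ x := by
  intro x hx
  cases l with
  | nil => simp at hx
  | cons a t =>
    rcases List.mem_cons.mp hx with rfl | hx
    · exact (PySem.List.foldl_min_le t x).1
    · exact (PySem.List.foldl_min_le t a).2 x hx

theorem pymin_mem (l : List Int) (h : l ≠ []) : pymin l ∈ l := by
  cases l with
  | nil => simp at h
  | cons a t =>
    rcases PySem.List.foldl_min_mem t a with h' | h'
    · simp [pymin, h']
    · simp [pymin]; right; exact h'

theorem pymin_eq (l : List Int) (x : Int) (hne : l ≠ []) (hx : x ∈ l)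
    (hmin : ∀ y ∈ l, x ≤ y) : pymin l = x :=
  le_antisymm (pymin_le l x hx) (hmin _ (pymin_mem l hne))

theorem foldl_minOptA_some (xs : List Int) : ∀ a : Int,
    (xs.map some).foldl minOptA (some a) = some (xs.foldl min a) := by
  induction xs with
  | nil => intro a; rfl
  | cons x t ih => intro a; simpa [minOptA] using ih (min a x)

theorem pyminL_map_some (l : List Int) (h : l ≠ []) :
    pyminL (l.map some) = some (pymin l) := by
  cases l with
  | nil => simp at h
  | cons a t => simpa [pyminL, pymin] using foldl_minOptA_some t a

theorem foldl_minOptA_none (l : List Int) (h : l ≠ []) :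
    (l.map some).foldl minOptA none = some (pymin l) := by
  cases l with
  | nil => simp at h
  | cons a t => simpa [pymin, minOptA] using foldl_minOptA_some t a

-- ---- specIle / vv / win ----

theorem length_specIle (T : List Int) (K m : Nat) : (specIle T K m).length = m := by
  induction m with
  | zero => rfl
  | succ m ih => simp [specIle, ih]

theorem specIle_succ (T : List Int) (K m : Nat) :
    specIle T K (m + 1) = specIle T K m ++
      [if m < K then T.getD m 0 else pymin (((specIle T K m).drop (m - K)).take K) + T.getD m 0] := rfl

theorem vv_eq (T : List Int) (K m : Nat) :
    vv T K m = if m < K then T.getD m 0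
      else pymin (((specIle T K m).drop (m - K)).take K) + T.getD m 0 := by
  rw [vv, specIle_succ]
  rw [List.getD_eq_getElem?_getD, List.getElem?_append_right (by simp [length_specIle])]
  simp [length_specIle]

theorem specIle_eq_map (T : List Int) (K : Nat) : ∀ m,
    specIle T K m = (List.range m).map (vv T K) := by
  intro m
  induction m with
  | zero => rfl
  | succ m ih =>
    rw [specIle_succ, List.range_succ, List.map_append, ih]
    congr 1
    simp only [List.map_cons, List.map_nil]
    rw [vv_eq, ih]

theorem window_eq_win (T : List Int) (K m : Nat) (hKm : K ≤ m) :
    ((((List.range m).map (vv T K)).drop (m - K)).take K) = win T K (m - K) K := by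
  apply List.ext_getElem
  · simp only [List.length_take, List.length_drop, List.length_map, List.length_range, win]
    omega
  · intro t h1 h2
    simp only [win, List.getElem_take, List.getElem_drop, List.getElem_map, List.getElem_range]

theorem vv_lt_K (T : List Int) (K m : Nat) (h : m < K) : vv T K m = T.getD m 0 := by
  rw [vv_eq]; simp [h]

theorem vv_ge_K (T : List Int) (K m : Nat) (h : K ≤ m) :
    vv T K m = pymin (win T K (m - K) K) + T.getD m 0 := by
  rw [vv_eq, specIle_eq_map, window_eq_win T K m h]
  simp [Nat.not_lt.mpr h]

theorem win_ne_nil (T : List Int) (K lo len : Nat) (h : 0 < len) : win T K lo len ≠ [] := by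
  simp [win, List.map_eq_nil_iff, List.range_eq_nil]; omega

theorem mem_win (T : List Int) (K lo len : Nat) (x : Int) :
    x ∈ win T K lo len ↔ ∃ t, t < len ∧ x = vv T K (lo + t) := by
  simp [win, eq_comm]

theorem pymin_win_eq (T : List Int) (K lo len f : Nat) (hlen : 0 < len)
    (hf1 : lo ≤ f) (hf2 : f < lo + len)
    (hmin : ∀ j, lo ≤ j → j < lo + len → vv T K f ≤ vv T K j) :
    pymin (win T K lo len) = vv T K f := by
  apply pymin_eq _ _ (win_ne_nil T K lo len hlen)
  · rw [mem_win]; exact ⟨f - lo, by omega, by congr 1; omega⟩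
  · intro y hy
    rcases (mem_win T K lo len y).mp hy with ⟨t, ht, rfl⟩
    exact hmin (lo + t) (by omega) (by omega)

-- ---- A-side: the three loops ----

theorem set_boundary {α : Type} (p : List α) (m r : Nat) (v c : α) (hl : p.length = m) (h : 0 < r) :
    (p ++ List.replicate r c).set m v = (p ++ [v]) ++ List.replicate (r-1) c := by
  subst hl
  rcases Nat.exists_eq_add_of_lt h with ⟨r', rfl⟩
  simp only [Nat.zero_add, List.replicate_succ]
  rw [List.set_append_right _ _ (Nat.le_refl _)]
  simp

theorem loopA1 (T : List Int) (K : Nat) (hKn : K ≤ T.length) : ∀ m, m ≤ K →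
    (PySem.List.pyRange 0 (m : Int) 1).foldl (fun ile i => ile.set i.toNat (PySem.List.pyGet? T i))
      (List.replicate T.length (none : Option Int))
    = (((List.range m).map (vv T K)).map some) ++ List.replicate (T.length - m) none := by
  intro m
  induction m with
  | zero => intro _; simp [PySem.List.pyRange_one_eq_nil]
  | succ m ih =>
    intro hm
    have hmn : m < T.length := by omega
    have hcast : ((m + 1 : Nat) : Int) = (m : Int) + 1 := by push_cast; ring
    rw [hcast, PySem.List.pyRange_one_succ_right (by positivity), List.foldl_append,
      ih (by omega)]
    simp only [List.foldl_cons, List.foldl_nil, Int.toNat_natCast]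
    have hlen : (((List.range m).map (vv T K)).map some).length = m := by simp
    have hget : PySem.List.pyGet? T (m : Int) = some (T.getD m 0) := by
      rw [PySem.List.pyGet?_natCast, List.getElem?_eq_getElem hmn, List.getD_eq_getElem _ _ hmn]
    rw [hget, set_boundary _ _ _ _ _ hlen (by omega)]
    rw [← vv_lt_K T K m (by omega)]
    simp [List.range_succ, Nat.sub_sub]

theorem loopA2 (T : List Int) (K : Nat) (hK1 : 1 ≤ K) : ∀ m, K ≤ m → m ≤ T.length →
    (PySem.List.pyRange (K : Int) (m : Int) 1).foldl
      (fun ile i => ile.set i.toNat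
        (match pyminL (PySem.List.slice ile (some (i - (K : Int))) (some i)), PySem.List.pyGet? T i with
         | some mn, some t => some (mn + t)
         | _, _ => none))
      ((((List.range K).map (vv T K)).map some) ++ List.replicate (T.length - K) none)
    = (((List.range m).map (vv T K)).map some) ++ List.replicate (T.length - m) none := by
  intro m hKm
  induction m, hKm using Nat.le_induction with
  | base => intro _; simp [PySem.List.pyRange_one_eq_nil]
  | succ m hKm ih =>
    intro hmn1
    have hmn : m < T.length := by omega
    have hcast : ((m + 1 : Nat) : Int) = (m : Int) + 1 := by push_cast; ring
    rw [hcast, PySem.List.pyRange_one_succ_right (by exact_mod_cast hKm), List.foldl_append,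
      ih (by omega)]
    simp only [List.foldl_cons, List.foldl_nil, Int.toNat_natCast]
    have hlen : (((List.range m).map (vv T K)).map some).length = m := by simp
    have hget : PySem.List.pyGet? T (m : Int) = some (T.getD m 0) := by
      rw [PySem.List.pyGet?_natCast, List.getElem?_eq_getElem hmn, List.getD_eq_getElem _ _ hmn]
    have hslice : PySem.List.slice
        ((((List.range m).map (vv T K)).map some) ++ List.replicate (T.length - m) none)
        (some ((m : Int) - (K : Int))) (some (m : Int))
        = (win T K (m - K) K).map some := by
      rw [show ((m : Int) - (K : Int)) = ((m - K : Nat) : Int) by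
            rw [Nat.cast_sub hKm],
          PySem.List.slice_natCast,
          List.drop_append_of_le_length (by simp only [List.length_map, List.length_range]; omega),
          show m - (m - K) = K by omega,
          List.take_append_of_le_length (by simp only [List.length_drop, List.length_map, List.length_range]; omega),
          ← List.map_drop, ← List.map_take, window_eq_win T K m hKm]
    rw [hslice, pyminL_map_some _ (win_ne_nil T K _ _ (by omega)), hget]
    simp only []
    rw [set_boundary _ _ _ _ _ hlen (by omega)]
    rw [← vv_ge_K T K m hKm]
    simp [List.range_succ, Nat.sub_sub]

theorem foldl_congr_mem_thm {α β : Type} {l : List β} {f g : α → β → α} {init : α}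
    (h : ∀ acc : α, ∀ x ∈ l, f acc x = g acc x) : l.foldl f init = l.foldl g init := by
  induction l generalizing init with
  | nil => rfl
  | cons x t ih =>
    simp only [List.foldl_cons]
    rw [h init x (by simp)]
    exact ih (fun acc y hy => h acc y (by simp [hy]))

theorem loopA3 (T : List Int) (K : Nat) (hK1 : 1 ≤ K) (hKn : K ≤ T.length) :
    (PySem.List.pyRange ((T.length : Int) - (K : Int)) (T.length : Int) 1).foldl
      (fun mini j => minOptA mini
        ((((List.range T.length).map (vv T K)).map some).getD j.toNat none)) none
    = some (pymin (win T K (T.length - K) K)) := by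
  rw [PySem.List.pyRange_one]
  have hKK : (((T.length : Int) - ((T.length : Int) - (K : Int))).toNat) = K := by omega
  rw [hKK, List.foldl_map]
  have hcong : ∀ (acc : Option Int), ∀ t ∈ List.range K,
      minOptA acc ((((List.range T.length).map (vv T K)).map some).getD
        (((T.length : Int) - (K : Int) + (t : Int)).toNat) none)
      = minOptA acc (some (vv T K (T.length - K + t))) := by
    intro acc t ht
    have ht' : t < K := List.mem_range.mp ht
    have hidx : ((T.length : Int) - (K : Int) + (t : Int)).toNat = T.length - K + t := by omega
    rw [hidx]
    congr 1
    have hlt : T.length - K + t < T.length := by omega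
    rw [List.getD_eq_getElem?_getD]
    simp [hlt]
  rw [foldl_congr_mem_thm hcong]
  have : (List.range K).foldl (fun acc t => minOptA acc (some (vv T K (T.length - K + t)))) none
      = ((win T K (T.length - K) K).map some).foldl minOptA none := by
    rw [win, List.map_map, List.foldl_map]
    rfl
  rw [this, foldl_minOptA_none _ (win_ne_nil T K _ _ (by omega))]

theorem ksumaA_eq (T : List Int) (K : Nat) (hK1 : 1 ≤ K) (hKn : K ≤ T.length) :
    ksuma T (K : Int) = pymin (win T K (T.length - K) K) := by
  simp only [ksuma]
  rw [show ((List.range T.length).map (fun _ => (none : Option Int))) = List.replicate T.length none by simp,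
      loopA1 T K hKn K (Nat.le_refl K),
      loopA2 T K hK1 T.length (by omega) (by omega)]
  simp only [Nat.sub_self, List.replicate_zero, List.append_nil]
  rw [loopA3 T K hK1 hKn]
  rfl

-- ---- B-side: deque characterizations and the invariant ----

def RelB (T : List Int) (K : Nat) (a b : Nat) : Prop := a < b ∧ vv T K a ≤ vv T K b

def InvB (T : List Int) (K : Nat) (i : Nat) (st : List Int × List Nat × Nat) : Prop :=
  st.1 = (List.range i).map (vv T K) ∧
  st.2.2 ≤ st.2.1.length ∧
  (st.2.1.drop st.2.2).Pairwise (RelB T K) ∧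
  (∀ a ∈ st.2.1.drop st.2.2, a < i) ∧
  (∀ j : Nat, i ≤ j + K → j < i → ∃ a ∈ st.2.1.drop st.2.2, j ≤ a ∧ vv T K a ≤ vv T K j)

theorem mem_dropWhile_of {α : Type} (l : List α) (p : α → Bool) (x : α)
    (hx : x ∈ l) (hpx : p x = false) : x ∈ l.dropWhile p := by
  rcases List.mem_append.mp (by rw [List.takeWhile_append_dropWhile]; exact hx :
      x ∈ l.takeWhile p ++ l.dropWhile p) with h | h
  · exact absurd (List.mem_takeWhile_imp h) (by simp [hpx])
  · exact h

theorem pairwise_getLast {α : Type} {R : α → α → Prop} (l : List α) (h : l.Pairwise R)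
    (hne : l ≠ []) : ∀ a ∈ l, a = l.getLast hne ∨ R a (l.getLast hne) := by
  intro a ha
  rw [← List.dropLast_append_getLast hne] at ha h
  rcases List.mem_append.mp ha with h1 | h1
  · right
    exact ((List.pairwise_append.mp h).2.2) a h1 _ (by simp)
  · left; simpa using h1

theorem advB_spec (dq : List Nat) (lo : Int) : ∀ (head : Nat), head ≤ dq.length →
    head ≤ advB dq lo head ∧ advB dq lo head ≤ dq.length ∧
    dq.drop (advB dq lo head) = (dq.drop head).dropWhile (fun a : Nat => decide ((a : Int) < lo)) := by
  intro head
  induction head using advB.induct (dq := dq) (lo := lo) with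
  | case1 head h hlt ih =>
    intro _
    rw [advB]; simp only [h, hlt, dif_pos, if_pos]
    obtain ⟨ih1, ih2, ih3⟩ := ih (by omega)
    refine ⟨by omega, ih2, ?_⟩
    rw [ih3, List.drop_eq_getElem_cons h, List.dropWhile_cons]
    simp [hlt]
  | case2 head h hlt =>
    intro _
    rw [advB]; simp only [h, dif_pos]
    rw [if_neg hlt]
    refine ⟨Nat.le_refl _, by omega, ?_⟩
    rw [List.drop_eq_getElem_cons h, List.dropWhile_cons]
    simp [hlt]
  | case3 head h =>
    intro hh
    rw [advB]; rw [dif_neg h]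
    have : head = dq.length := by omega
    subst this
    simp

theorem getLastD_eq_getLast {α : Type} [Inhabited α] (l : List α) (hne : l ≠ []) (d : α) :
    l.getLastD d = l.getLast hne := by
  rw [List.getLastD_eq_getLast?, List.getLast?_eq_some_getLast hne]
  rfl

theorem popB_spec (ile : List Int) (val : Int) :
    ∀ (head : Nat) (dq : List Nat), head ≤ dq.length →
    ∃ q s : List Nat, dq.drop head = q ++ s ∧ popB ile val head dq = dq.take head ++ q ∧
      (∀ a ∈ s, val ≤ ile.getD a 0) ∧ (∀ hq : q ≠ [], ile.getD (q.getLast hq) 0 < val) := by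
  intro head dq
  induction dq using popB.induct (ile := ile) (val := val) (head := head) with
  | case1 dq h ih =>
    intro hh
    have hne : dq ≠ [] := by
      intro e; subst e; simp at h
    have hdl : head ≤ dq.dropLast.length := by
      simp [List.length_dropLast]; omega
    obtain ⟨q, s, hsplit, hpop, hs, hlast⟩ := ih hdl
    refine ⟨q, s ++ [dq.getLast hne], ?_, ?_, ?_, hlast⟩
    · rw [← List.append_assoc, ← hsplit]
      conv_lhs => rw [← List.dropLast_append_getLast hne]
      rw [List.drop_append_of_le_length hdl]
    · rw [popB, if_pos h, hpop]
      conv_rhs => rw [show dq.take head = (dq.dropLast ++ [dq.getLast hne]).take head by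
        rw [List.dropLast_append_getLast hne]]
      rw [List.take_append_of_le_length hdl]
    · intro a ha
      rcases List.mem_append.mp ha with h1 | h1
      · exact hs a h1
      · have : a = dq.getLast hne := by simpa using h1
        subst this
        have := h.2
        rwa [getLastD_eq_getLast dq hne 0] at this
  | case2 dq h =>
    intro hh
    refine ⟨dq.drop head, [], by simp, ?_, by simp, ?_⟩
    · rw [popB, if_neg h, List.take_append_drop]
    · intro hq
      have hlt : head < dq.length := by
        rcases Nat.lt_or_ge head dq.length with h' | h'
        · exact h'
        · exfalso; apply hq; rw [List.drop_eq_nil_iff.mpr]; omega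
      have hne : dq ≠ [] := by intro e; subst e; simp at hlt
      have hval : ile.getD (dq.getLastD 0) 0 < val := by
        rcases Nat.lt_or_ge 0 1 with _ | _
        · by_contra hc
          exact h ⟨hlt, by omega⟩
        · omega
      have hgl : (dq.drop head).getLast hq = dq.getLast hne := by
        have h1 : (dq.drop head).getLast? = dq.getLast? := by
          conv_rhs => rw [← List.take_append_drop head dq]
          rw [List.getLast?_append, List.getLast?_eq_some_getLast hq]
          rfl
        rw [List.getLast?_eq_some_getLast hq, List.getLast?_eq_some_getLast hne] at h1
        exact Option.some.inj h1
      rw [hgl, ← getLastD_eq_getLast dq hne 0]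
      exact hval

theorem dropWhile_cons_false {α : Type} (p : α → Bool) :
    ∀ (l : List α) (x : α) (xs : List α), l.dropWhile p = x :: xs → p x = false := by
  intro l
  induction l with
  | nil => intro x xs h; simp at h
  | cons a t ih =>
    intro x xs h
    rw [List.dropWhile_cons] at h
    by_cases hpa : p a
    · rw [if_pos hpa] at h; exact ih x xs h
    · rw [if_neg hpa] at h
      have : a = x := (List.cons_eq_cons.mp h).1
      subst this
      simpa using hpa

theorem frontB (T : List Int) (K : Nat) (hK1 : 1 ≤ K) (dq : List Nat) (head i : Nat)
    (hKi : K ≤ i) (hh : head ≤ dq.length)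
    (hpw : (dq.drop head).Pairwise (RelB T K))
    (hb : ∀ a ∈ dq.drop head, a < i)
    (hcov : ∀ j, i ≤ j + K → j < i → ∃ a ∈ dq.drop head, j ≤ a ∧ vv T K a ≤ vv T K j) :
    head ≤ advB dq ((i : Int) - (K : Int)) head ∧
    advB dq ((i : Int) - (K : Int)) head ≤ dq.length ∧
    dq.drop (advB dq ((i : Int) - (K : Int)) head) =
      (dq.drop head).dropWhile (fun a : Nat => decide ((a : Int) < (i : Int) - (K : Int))) ∧
    ∃ f : Nat, dq.getD (advB dq ((i : Int) - (K : Int)) head) 0 = f ∧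
      i - K ≤ f ∧ f < i ∧ f ∈ dq.drop (advB dq ((i : Int) - (K : Int)) head) ∧
      (∀ j, i - K ≤ j → j < i → vv T K f ≤ vv T K j) := by
  obtain ⟨h1, h2, h3⟩ := advB_spec dq ((i : Int) - (K : Int)) head hh
  refine ⟨h1, h2, h3, ?_⟩
  set p : Nat → Bool := fun a : Nat => decide ((a : Int) < (i : Int) - (K : Int)) with hp
  -- the deque is nonempty after expiry: i-1 is in it
  obtain ⟨a0, ha0mem, ha0ge, _⟩ := hcov (i - 1) (by omega) (by omega)
  have ha0 : a0 = i - 1 := by have := hb a0 ha0mem; omega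
  have hpa0 : p a0 = false := by simp [hp]; subst ha0; omega
  have hne : dq.drop (advB dq ((i : Int) - (K : Int)) head) ≠ [] := by
    rw [h3]
    intro hcon
    have := (List.dropWhile_eq_nil_iff).mp hcon a0 ha0mem
    simp [hpa0] at this
  obtain ⟨f, rest, hact⟩ := List.exists_cons_of_ne_nil hne
  have hfd : dq.getD (advB dq ((i : Int) - (K : Int)) head) 0 = f := by
    rw [List.getD_eq_getElem?_getD,
      show dq[advB dq ((i : Int) - (K : Int)) head]? =
        (dq.drop (advB dq ((i : Int) - (K : Int)) head))[0]? by
          rw [List.getElem?_drop]; norm_num, hact]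
    simp
  have hfmem : f ∈ dq.drop (advB dq ((i : Int) - (K : Int)) head) := by rw [hact]; simp
  have hfmemact : f ∈ dq.drop head := (List.dropWhile_sublist _).mem (by rwa [h3] at hfmem)
  have hfi : f < i := hb f hfmemact
  have hpf : p f = false :=
    dropWhile_cons_false p (dq.drop head) f rest (by rw [← h3]; exact hact)
  have hflo : i - K ≤ f := by
    simp [hp] at hpf
    omega
  refine ⟨f, hfd, hflo, hfi, hfmem, ?_⟩
  intro j hj1 hj2
  obtain ⟨a, hamem, haj, hav⟩ := hcov j (by omega) hj2
  have hpa : p a = false := by simp [hp]; omega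
  have hamem' : a ∈ dq.drop (advB dq ((i : Int) - (K : Int)) head) := by
    rw [h3]; exact mem_dropWhile_of _ p a hamem hpa
  have hpw' : (dq.drop (advB dq ((i : Int) - (K : Int)) head)).Pairwise (RelB T K) :=
    hpw.sublist (by rw [h3]; exact List.dropWhile_sublist _)
  have hffirst : vv T K f ≤ vv T K a := by
    rw [hact] at hamem' hpw'
    rcases List.mem_cons.mp hamem' with rfl | hm
    · exact le_refl _
    · exact ((List.pairwise_cons.mp hpw').1 a hm).2
  exact le_trans hffirst hav

theorem pushB (T : List Int) (K : Nat) (i : Nat) (dq : List Nat) (head : Nat) (val : Int)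
    (hh : head ≤ dq.length)
    (hpw : (dq.drop head).Pairwise (RelB T K))
    (hb : ∀ a ∈ dq.drop head, a < i)
    (hcov : ∀ j, i ≤ j + K → j < i → ∃ a ∈ dq.drop head, j ≤ a ∧ vv T K a ≤ vv T K j)
    (hval : val = vv T K i) :
    InvB T K (i + 1)
      ((List.range i).map (vv T K) ++ [val],
       popB ((List.range i).map (vv T K)) val head dq ++ [i], head) := by
  obtain ⟨q, s, hsplit, hpop, hs, hlast⟩ := popB_spec ((List.range i).map (vv T K)) val head dq hh
  have hqsub : q.Sublist (dq.drop head) := by rw [hsplit]; exact List.sublist_append_left q s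
  have hqmem : ∀ a ∈ q, a ∈ dq.drop head := fun a ha => hqsub.mem ha
  have hsmem : ∀ a ∈ s, a ∈ dq.drop head := by
    intro a ha; rw [hsplit]; exact List.mem_append.mpr (Or.inr ha)
  have htake : (dq.take head).length = head := by simp [List.length_take]; omega
  have hdrop' : (popB ((List.range i).map (vv T K)) val head dq ++ [i]).drop head = q ++ [i] := by
    rw [hpop, List.append_assoc, List.drop_left' htake]
  have hqvv : ∀ a ∈ q, vv T K a ≤ vv T K i := by
    intro a ha
    have hqne : q ≠ [] := by intro e; subst e; simp at ha
    have hlstmem : q.getLast hqne ∈ dq.drop head := hqmem _ (List.getLast_mem hqne)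
    have hlsti : q.getLast hqne < i := hb _ hlstmem
    have hlstv : vv T K (q.getLast hqne) < vv T K i := by
      have := hlast hqne
      rw [getD_map_range_lt _ _ _ _ hlsti] at this
      rwa [hval] at this
    rcases pairwise_getLast q (hpw.sublist hqsub) hqne a ha with rfl | hr
    · omega
    · exact le_trans hr.2 (le_of_lt hlstv)
  refine ⟨?_, ?_, ?_, ?_, ?_⟩
  · simp [hval, List.range_succ]
  · simp only [hpop, List.length_append, List.length_cons, List.length_nil, htake]
    omega
  · rw [hdrop', List.pairwise_append]
    refine ⟨hpw.sublist hqsub, by simp, ?_⟩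
    intro a ha b hb'
    have hb'' : b = i := by simpa using hb'
    subst hb''
    exact ⟨hb a (hqmem a ha), hqvv a ha⟩
  · rw [hdrop']
    intro a ha
    rcases List.mem_append.mp ha with h1 | h1
    · have := hb a (hqmem a h1); omega
    · have : a = i := by simpa using h1
      omega
  · rw [hdrop']
    intro j hj1 hj2
    by_cases hji : j = i
    · subst hji
      exact ⟨j, by simp, le_refl _, le_refl _⟩
    · have hji' : j < i := by omega
      obtain ⟨a, hamem, haj, hav⟩ := hcov j (by omega) hji'
      rw [hsplit] at hamem
      rcases List.mem_append.mp hamem with h1 | h1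
      · exact ⟨a, List.mem_append.mpr (Or.inl h1), haj, hav⟩
      · refine ⟨i, by simp, by omega, ?_⟩
        have hai : a < i := hb a (hsmem a h1)
        have := hs a h1
        rw [getD_map_range_lt _ _ _ _ hai] at this
        calc vv T K i = val := hval.symm
          _ ≤ vv T K a := this
          _ ≤ vv T K j := hav

theorem stepB (T : List Int) (K : Nat) (hK1 : 1 ≤ K) (i : Nat)
    (st : List Int × List Nat × Nat) (h : InvB T K i st) :
    InvB T K (i + 1)
      (if (i : Int) < (K : Int) then
        (st.1 ++ [T.getD i 0], popB st.1 (T.getD i 0) st.2.2 st.2.1 ++ [i], st.2.2)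
      else
        (st.1 ++ [st.1.getD (st.2.1.getD (advB st.2.1 ((i : Int) - (K : Int)) st.2.2) 0) 0 + T.getD i 0],
         popB st.1 (st.1.getD (st.2.1.getD (advB st.2.1 ((i : Int) - (K : Int)) st.2.2) 0) 0 + T.getD i 0)
           (advB st.2.1 ((i : Int) - (K : Int)) st.2.2) st.2.1 ++ [i],
         advB st.2.1 ((i : Int) - (K : Int)) st.2.2)) := by
  obtain ⟨hile, hh, hpw, hb, hcov⟩ := h
  by_cases hik : (i : Int) < (K : Int)
  · rw [if_pos hik]
    have hiK : i < K := by exact_mod_cast hik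
    have hval : T.getD i 0 = vv T K i := (vv_lt_K T K i hiK).symm
    rw [hile]
    exact pushB T K i st.2.1 st.2.2 (T.getD i 0) hh hpw hb hcov hval
  · rw [if_neg hik]
    have hiK : K ≤ i := by
      by_contra hc
      exact hik (by exact_mod_cast Nat.lt_of_not_le hc)
    obtain ⟨ha1, ha2, ha3, f, hfd, hflo, hfi, hfmem, hfmin⟩ :=
      frontB T K hK1 st.2.1 st.2.2 i hiK hh hpw hb hcov
    have hval : st.1.getD (st.2.1.getD (advB st.2.1 ((i : Int) - (K : Int)) st.2.2) 0) 0 + T.getD i 0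
        = vv T K i := by
      rw [hile, hfd, getD_map_range_lt _ _ _ _ hfi,
        show vv T K f = pymin (win T K (i - K) K) from
          (pymin_win_eq T K (i - K) K f (by omega) hflo (by omega)
            (fun j hj1 hj2 => hfmin j hj1 (by omega))).symm,
        ← vv_ge_K T K i hiK]
    have hpw' : (st.2.1.drop (advB st.2.1 ((i : Int) - (K : Int)) st.2.2)).Pairwise (RelB T K) :=
      hpw.sublist (by rw [ha3]; exact List.dropWhile_sublist _)
    have hb' : ∀ a ∈ st.2.1.drop (advB st.2.1 ((i : Int) - (K : Int)) st.2.2), a < i := by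
      intro a ha
      exact hb a ((List.dropWhile_sublist _).mem (by rwa [ha3] at ha))
    have hcov' : ∀ j, i ≤ j + K → j < i →
        ∃ a ∈ st.2.1.drop (advB st.2.1 ((i : Int) - (K : Int)) st.2.2), j ≤ a ∧ vv T K a ≤ vv T K j := by
      intro j hj1 hj2
      obtain ⟨a, hamem, haj, hav⟩ := hcov j hj1 hj2
      refine ⟨a, ?_, haj, hav⟩
      rw [ha3]
      refine mem_dropWhile_of _ _ a hamem ?_
      simp only [decide_eq_false_iff_not, not_lt]
      omega
    rw [hile]
    have := pushB T K i st.2.1 (advB st.2.1 ((i : Int) - (K : Int)) st.2.2)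
      (st.1.getD (st.2.1.getD (advB st.2.1 ((i : Int) - (K : Int)) st.2.2) 0) 0 + T.getD i 0)
      ha2 hpw' hb' hcov' hval
    rwa [hile] at this

theorem foldB (T : List Int) (K : Nat) (hK1 : 1 ≤ K) : ∀ m, m ≤ T.length →
    InvB T K m ((List.range m).foldl
      (fun (st : List Int × List Nat × Nat) (i : Nat) =>
        let ile := st.1
        let dq := st.2.1
        let head := st.2.2
        if (i : Int) < ((K : Nat) : Int) then
          let val := T.getD i 0
          (ile ++ [val], popB ile val head dq ++ [i], head)
        else
          let head := advB dq ((i : Int) - ((K : Nat) : Int)) head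
          let val := ile.getD (dq.getD head 0) 0 + T.getD i 0
          (ile ++ [val], popB ile val head dq ++ [i], head))
      ([], [], 0)) := by
  intro m
  induction m with
  | zero =>
    intro _
    exact ⟨by simp, by simp, by simp, by simp, by intro j h1 h2; omega⟩
  | succ m ih =>
    intro hm
    rw [List.range_succ, List.foldl_append, List.foldl_cons, List.foldl_nil]
    exact stepB T K hK1 m _ (ih (by omega))

theorem ksumaB_eq (T : List Int) (K : Nat) (hK1 : 1 ≤ K) (hKn : K ≤ T.length) :
    ksuma_alt T (K : Int) = pymin (win T K (T.length - K) K) := by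
  have hinv := foldB T K hK1 T.length (Nat.le_refl _)
  simp only [ksuma_alt]
  obtain ⟨hile, hh, hpw, hb, hcov⟩ := hinv
  obtain ⟨ha1, ha2, ha3, f, hfd, hflo, hfi, hfmem, hfmin⟩ :=
    frontB T K hK1 _ _ T.length hKn hh hpw hb hcov
  rw [hile, hfd, getD_map_range_lt _ _ _ _ hfi]
  exact (pymin_win_eq T K (T.length - K) K f (by omega) hflo (by omega)
    (fun j hj1 hj2 => hfmin j hj1 (by omega))).symm

theorem ksuma_spec : Claim_equal_ksuma := by
  intro T k hdom hpre
  obtain ⟨h1, h2⟩ := hpre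
  unfold Spec_ksuma
  have hk : k = ((k.toNat : Nat) : Int) := (Int.toNat_of_nonneg (by omega)).symm
  have hK1 : 1 ≤ k.toNat := by omega
  have hKn : k.toNat ≤ T.length := by omega
  rw [hk, ksumaA_eq T k.toNat hK1 hKn, ksumaB_eq T k.toNat hK1 hKn]
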